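-- pv_equiv track=rewrite | github.com/Diego77Blaze/Algoritmia | Lab3/Ejer7_3.py | juntarMatriz
-- ===== SOURCE A (Python) =====
-- def juntarMatriz(mini1, mini2, mini3, mini4):
--     matriz = []
--     for i in range (0, int(len(mini1)*2)):
--         row = []
--         if i < int(len(mini1)):
--             for j in range(0, int(len(mini1)*2)):
--                 if j < int(len(mini1)):
--                     row.append(mini1[i][j])
--                 else:
--                     row.append(mini2[i][j-int(len(mini2))])
--             matriz.append(row)
--         else:
--             for j in range(0, int(len(mini3)*2)):
--                 if j < int(len(mini3)):
--                     row.append(mini3[i-int(len(mini3))][j])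
--                 else:
--                     row.append(mini4[i-int(len(mini4))][j-int(len(mini4))])
--             matriz.append(row)
--     return matriz
-- ===== SOURCE B (Python) =====
-- def juntarMatriz(mini1, mini2, mini3, mini4):
--     n = len(mini1)
--     top = [mini1[i][:n] + mini2[i][:n] for i in range(n)]
--     bottom = [mini3[i][:n] + mini4[i][:n] for i in range(n)]
--     return top + bottom
-- ===== Notes on version B (the rewrite author's own statement) =====
-- stated objective: simpler
-- what changed: Replaces the per-element double loop with quadrant-selecting if-branches by direct row concatenation: each output row is a slice of a left-quadrant row joined to a slice of the right-quadrant row, top half then bottom half.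
-- outside the precondition, e.g. on juntarMatriz([[1]], [[2, 3], [4, 5]], [[6]], [[7]]): A returns [[1, 3], [6, 7]], B returns [[1, 2], [6, 7]]
import Mathlib
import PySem

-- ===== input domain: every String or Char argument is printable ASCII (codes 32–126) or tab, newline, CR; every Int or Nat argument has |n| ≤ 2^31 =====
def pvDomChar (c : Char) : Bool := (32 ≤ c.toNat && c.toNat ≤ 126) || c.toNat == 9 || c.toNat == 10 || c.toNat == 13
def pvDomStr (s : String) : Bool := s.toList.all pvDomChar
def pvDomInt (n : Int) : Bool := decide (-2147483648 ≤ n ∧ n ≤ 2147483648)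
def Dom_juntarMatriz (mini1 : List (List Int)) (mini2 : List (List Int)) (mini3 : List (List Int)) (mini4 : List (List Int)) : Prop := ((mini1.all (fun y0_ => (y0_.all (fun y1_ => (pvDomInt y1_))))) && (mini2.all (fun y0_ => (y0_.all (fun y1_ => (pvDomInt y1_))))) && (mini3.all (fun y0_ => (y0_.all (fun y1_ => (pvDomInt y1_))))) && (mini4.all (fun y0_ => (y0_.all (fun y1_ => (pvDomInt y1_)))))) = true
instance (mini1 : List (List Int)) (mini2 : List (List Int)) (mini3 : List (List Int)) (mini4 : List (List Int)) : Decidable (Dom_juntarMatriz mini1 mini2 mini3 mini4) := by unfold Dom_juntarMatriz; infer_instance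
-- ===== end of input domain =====

set_option maxHeartbeats 1000000


-- B merges the four quadrants by row concatenation (slice + join per row) instead of A's
-- per-element if-branching double loop; same cost, simpler structure.

-- ===== PORT A =====
-- Literal transliteration of A.  Indexing uses PySem.List.pyGetD (defaults 0 / []); it is
-- exact wherever the Python index is in range, which Pre_juntarMatriz guarantees.
def juntarMatriz (mini1 : List (List Int)) (mini2 : List (List Int)) (mini3 : List (List Int)) (mini4 : List (List Int)) : List (List Int) :=
  (PySem.List.pyRange 0 (2 * (mini1.length : Int)) 1).foldl (fun matriz i =>
    if i < (mini1.length : Int) then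
      matriz ++ [(PySem.List.pyRange 0 (2 * (mini1.length : Int)) 1).foldl (fun row j =>
        if j < (mini1.length : Int) then
          row ++ [PySem.List.pyGetD (PySem.List.pyGetD mini1 i []) j 0]
        else
          row ++ [PySem.List.pyGetD (PySem.List.pyGetD mini2 i []) (j - (mini2.length : Int)) 0]) []]
    else
      matriz ++ [(PySem.List.pyRange 0 (2 * (mini3.length : Int)) 1).foldl (fun row j =>
        if j < (mini3.length : Int) then
          row ++ [PySem.List.pyGetD (PySem.List.pyGetD mini3 (i - (mini3.length : Int)) []) j 0]
        else
          row ++ [PySem.List.pyGetD (PySem.List.pyGetD mini4 (i - (mini4.length : Int)) []) (j - (mini4.length : Int)) 0]) []]) []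

-- ===== PORT B =====
-- Literal transliteration of Source B: two row-wise comprehensions over range(n), then top ++ bottom.
def juntarMatriz_alt (mini1 : List (List Int)) (mini2 : List (List Int)) (mini3 : List (List Int)) (mini4 : List (List Int)) : List (List Int) :=
  ((PySem.List.pyRange 0 (mini1.length : Int) 1).map (fun i =>
    PySem.List.slice (PySem.List.pyGetD mini1 i []) none (some (mini1.length : Int)) ++
    PySem.List.slice (PySem.List.pyGetD mini2 i []) none (some (mini1.length : Int)))) ++
  ((PySem.List.pyRange 0 (mini1.length : Int) 1).map (fun i =>
    PySem.List.slice (PySem.List.pyGetD mini3 i []) none (some (mini1.length : Int)) ++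
    PySem.List.slice (PySem.List.pyGetD mini4 i []) none (some (mini1.length : Int))))

-- ===== PRECONDITION & SPEC =====
-- Pre_ excludes inputs whose quadrants are not four equally long matrices with rows of at
-- least that length (unless mini1 is empty, where A trivially returns []): on those inputs
-- A either raises IndexError or returns a value through Python negative-index wraparound,
-- an accident of its index arithmetic that no caller of a quadrant merge would rely on.
def Pre_juntarMatriz (mini1 : List (List Int)) (mini2 : List (List Int)) (mini3 : List (List Int)) (mini4 : List (List Int)) : Prop :=
  (mini1.isEmpty ||
   ((mini2.length == mini1.length) && (mini3.length == mini1.length) &&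
    (mini4.length == mini1.length) &&
    mini1.all (fun r => decide (mini1.length ≤ r.length)) &&
    mini2.all (fun r => decide (mini1.length ≤ r.length)) &&
    mini3.all (fun r => decide (mini1.length ≤ r.length)) &&
    mini4.all (fun r => decide (mini1.length ≤ r.length)))) = true
instance (mini1 : List (List Int)) (mini2 : List (List Int)) (mini3 : List (List Int)) (mini4 : List (List Int)) : Decidable (Pre_juntarMatriz mini1 mini2 mini3 mini4) := by unfold Pre_juntarMatriz; infer_instance

def pvWitness_juntarMatriz : List (List Int) × List (List Int) × List (List Int) × List (List Int) :=
  ([[1, 2], [3, 4]], [[5, 6], [7, 8]], [[9, 10], [11, 12]], [[13, 14], [15, 16]])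

def Spec_juntarMatriz (mini1 : List (List Int)) (mini2 : List (List Int)) (mini3 : List (List Int)) (mini4 : List (List Int)) (out : List (List Int)) : Prop := out = juntarMatriz_alt mini1 mini2 mini3 mini4
instance (mini1 : List (List Int)) (mini2 : List (List Int)) (mini3 : List (List Int)) (mini4 : List (List Int)) (out : List (List Int)) : Decidable (Spec_juntarMatriz mini1 mini2 mini3 mini4 out) := by unfold Spec_juntarMatriz; infer_instance

-- ===== CLAIM (what is proved, stated in full; the proofs are below) =====
def Claim_equal_juntarMatriz : Prop := ∀ (mini1 : List (List Int)) (mini2 : List (List Int)) (mini3 : List (List Int)) (mini4 : List (List Int)), Dom_juntarMatriz mini1 mini2 mini3 mini4 → Pre_juntarMatriz mini1 mini2 mini3 mini4 → Spec_juntarMatriz mini1 mini2 mini3 mini4 (juntarMatriz mini1 mini2 mini3 mini4)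

-- ===== LEMMAS AND PROOFS =====

-- Loop shape: append-one-element body with a two-way branch is a map.
lemma foldl_ite_append {α β : Type} (l : List α) (c : α → Prop) [DecidablePred c]
    (f g : α → β) (init : List β) :
    l.foldl (fun acc x => if c x then acc ++ [f x] else acc ++ [g x]) init
    = init ++ l.map (fun x => if c x then f x else g x) := by
  have h : (fun (acc : List β) x => if c x then acc ++ [f x] else acc ++ [g x])
      = fun acc x => acc ++ [if c x then f x else g x] := by
    funext acc x; split_ifs <;> rfl
  rw [h, PySem.List.foldl_append_singleton_eq_map]

-- Reading off indices 0..n-1 of a row of length ≥ n is `take n`.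
lemma take_eq_map_range (r : List Int) (n : Nat) (h : n ≤ r.length) :
    (List.range n).map (fun (k : Nat) => PySem.List.pyGetD r (k : Int) 0) = r.take n := by
  apply List.ext_getElem
  · simp [Nat.min_eq_left h]
  · intro i h1 h2
    simp only [List.getElem_map, List.getElem_range, PySem.List.pyGetD_natCast,
      List.getElem_take]
    have hi : i < n := by simpa using h1
    exact List.getD_eq_getElem r 0 (lt_of_lt_of_le hi h)

-- A's inner loop over range(2n) with the j-branch is the concatenation of the two row slices.
lemma inner_row (r1 r2 : List Int) (n : Nat) (h1 : n ≤ r1.length) (h2 : n ≤ r2.length) :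
    (PySem.List.pyRange 0 (2 * (n : Int)) 1).foldl (fun row j =>
        if j < (n : Int) then row ++ [PySem.List.pyGetD r1 j 0]
        else row ++ [PySem.List.pyGetD r2 (j - (n : Int)) 0]) []
    = r1.take n ++ r2.take n := by
  rw [foldl_ite_append _ (fun j => j < (n : Int)), List.nil_append,
    PySem.List.pyRange_one_append 0 (n : Int) (2 * n) (by omega) (by omega), List.map_append]
  have e1 : ((n : Int) - 0).toNat = n := by omega
  have e2 : (2 * (n : Int) - n).toNat = n := by omega
  rw [PySem.List.pyRange_one 0 (n : Int), PySem.List.pyRange_one (n : Int) (2 * n), e1, e2,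
    List.map_map, List.map_map]
  congr 1
  · rw [← take_eq_map_range r1 n h1]
    apply List.map_congr_left
    intro k hk
    have hk' : k < n := List.mem_range.mp hk
    simp only [Function.comp_apply, zero_add, if_pos (by exact_mod_cast hk' : (k : Int) < n)]
  · rw [← take_eq_map_range r2 n h2]
    apply List.map_congr_left
    intro k hk
    have hk' : k < n := List.mem_range.mp hk
    have hge : ¬ ((n : Int) + k < n) := by omega
    simp only [Function.comp_apply, if_neg hge, add_sub_cancel_left]

lemma witness_pre : Dom_juntarMatriz (pvWitness_juntarMatriz.1) (pvWitness_juntarMatriz.2.1) (pvWitness_juntarMatriz.2.2.1) (pvWitness_juntarMatriz.2.2.2) ∧ Pre_juntarMatriz (pvWitness_juntarMatriz.1) (pvWitness_juntarMatriz.2.1) (pvWitness_juntarMatriz.2.2.1) (pvWitness_juntarMatriz.2.2.2) := by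
  constructor <;> decide

-- ===== VERDICT (by name: the statement is the Claim_ definition above) =====
theorem juntarMatriz_spec : Claim_equal_juntarMatriz := by
  intro m1 m2 m3 m4 _hdom hpre
  unfold Spec_juntarMatriz juntarMatriz juntarMatriz_alt
  unfold Pre_juntarMatriz at hpre
  simp only [Bool.or_eq_true, Bool.and_eq_true, List.isEmpty_iff, beq_iff_eq,
    List.all_eq_true, decide_eq_true_eq, and_assoc] at hpre
  rcases hpre with h1 | ⟨h2, h3, h4, hr1, hr2, hr3, hr4⟩
  · subst h1
    simp [PySem.List.pyRange_one_eq_nil]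
  · rw [h2, h3, h4]
    set n := m1.length with hn
    -- pull the append out of the outer branch, turn the outer foldl into a map
    rw [foldl_ite_append _ (fun i => i < (n : Int)), List.nil_append]
    -- first replace each produced row by the two concatenated row prefixes …
    refine Eq.trans (List.map_congr_left (g := fun i : Int =>
        if i < (n : Int) then
          (PySem.List.pyGetD m1 i []).take n ++ (PySem.List.pyGetD m2 i []).take n
        else
          (PySem.List.pyGetD m3 (i - (n : Int)) []).take n ++
          (PySem.List.pyGetD m4 (i - (n : Int)) []).take n)
      ?_) ?_
    · intro i hi
      rw [PySem.List.mem_pyRange_one] at hi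
      beta_reduce
      split_ifs with hc
      · have hrange1 : PySem.Raise.InRange m1.length i := by
          unfold PySem.Raise.InRange; omega
        have hrange2 : PySem.Raise.InRange m2.length i := by
          rw [h2]; unfold PySem.Raise.InRange; omega
        exact inner_row _ _ n (hr1 _ (PySem.List.pyGetD_mem _ _ hrange1))
          (hr2 _ (PySem.List.pyGetD_mem _ _ hrange2))
      · have hrange3 : PySem.Raise.InRange m3.length (i - (n : Int)) := by
          rw [h3]; unfold PySem.Raise.InRange; omega
        have hrange4 : PySem.Raise.InRange m4.length (i - (n : Int)) := by
          rw [h4]; unfold PySem.Raise.InRange; omega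
        exact inner_row _ _ n (hr3 _ (PySem.List.pyGetD_mem _ _ hrange3))
          (hr4 _ (PySem.List.pyGetD_mem _ _ hrange4))
    -- … then split range(2n) into the top and bottom halves and reindex the bottom one
    · rw [PySem.List.pyRange_one_append 0 (n : Int) (2 * n) (by omega) (by omega),
        List.map_append]
      congr 1
      · apply List.map_congr_left
        intro i hi
        rw [PySem.List.mem_pyRange_one] at hi
        rw [if_pos hi.2, PySem.List.slice_to_natCast, PySem.List.slice_to_natCast]
      · have e1 : ((n : Int) - 0).toNat = n := by omega
        have e2 : (2 * (n : Int) - n).toNat = n := by omega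
        rw [PySem.List.pyRange_one 0 (n : Int), PySem.List.pyRange_one (n : Int) (2 * n),
          e1, e2, List.map_map, List.map_map]
        apply List.map_congr_left
        intro k hk
        have hk' : k < n := List.mem_range.mp hk
        have hge : ¬ ((n : Int) + k < n) := by omega
        have eidx : (n : Int) + k - n = (k : Int) := by ring
        simp only [Function.comp_apply, if_neg hge, eidx, zero_add]
        rw [PySem.List.slice_to_natCast, PySem.List.slice_to_natCast]
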